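-- pv_equiv track=rewrite | github.com/rand/ananke-sglang | python/sglang/srt/constrained/ananke/parsing/languages/go.py | _tokenize_simple
-- ===== SOURCE A (Python) =====
-- from typing import Any, Dict, FrozenSet, List, Optional, Set, Tuple
--
-- def _tokenize_simple(text: str) -> List[str]:
--     """Simple tokenization for context tracking."""
--     tokens = []
--     current = []
--
--     for char in text:
--         if char.isspace():
--             if current:
--                 tokens.append("".join(current))
--                 current = []
--         elif char in "()[]{}.,;:":
--             if current:
--                 tokens.append("".join(current))
--                 current = []
--             tokens.append(char)
--         elif char in "+-*/%&|^<>=!":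
--             if current:
--                 tokens.append("".join(current))
--                 current = []
--             current.append(char)
--         else:
--             current.append(char)
--
--     if current:
--         tokens.append("".join(current))
--
--     return tokens
-- ===== SOURCE B (Python) =====
-- def _tokenize_simple(text):
--     """Maximal-munch scan: emit each token in one step instead of a char buffer."""
--     punct = "()[]{}.,;:"
--     ops = "+-*/%&|^<>=!"
--     tokens = []
--     i, n = 0, len(text)
--     while i < n:
--         c = text[i]
--         i += 1
--         if c.isspace():
--             continue
--         if c in punct:
--             tokens.append(c)
--             continue
--         # operator or word char: absorb the following run of word chars
--         j = i
--         while j < n and not (text[j].isspace() or text[j] in punct or text[j] in ops):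
--             j += 1
--         tokens.append(c + text[i:j])
--         i = j
--     return tokens
-- ===== Notes on version B (the rewrite author's own statement) =====
-- stated objective: idiomatic
-- what changed: Replaces A's char-by-char loop with a flush buffer by a maximal-munch index scan that emits each whole token (punctuation char, or operator/word char plus its following run of word chars) in one step.
import Mathlib
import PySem

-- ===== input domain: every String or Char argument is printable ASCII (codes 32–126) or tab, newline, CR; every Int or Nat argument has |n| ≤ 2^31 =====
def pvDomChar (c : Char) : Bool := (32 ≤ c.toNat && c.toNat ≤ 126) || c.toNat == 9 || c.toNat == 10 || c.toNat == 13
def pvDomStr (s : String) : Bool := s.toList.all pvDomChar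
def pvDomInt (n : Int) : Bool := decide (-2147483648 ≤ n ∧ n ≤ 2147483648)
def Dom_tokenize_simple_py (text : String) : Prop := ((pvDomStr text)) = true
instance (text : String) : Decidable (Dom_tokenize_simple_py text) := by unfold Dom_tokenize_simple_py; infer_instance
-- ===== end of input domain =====

-- B replaces A's char-by-char flush buffer with a maximal-munch scan that emits each whole token in one step (objective: idiomatic/alternative, same cost).

-- ===== PORT A =====
def pvGoPunct : List Char := "()[]{}.,;:".toList
def pvGoOps : List Char := "+-*/%&|^<>=!".toList

-- one iteration of A's `for char in text` loop; state = (tokens, current)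
def pvTokStep (st : List String × List Char) (c : Char) : List String × List Char :=
  if PySem.Chars.isspace c then
    if !st.2.isEmpty then (st.1 ++ [String.mk st.2], []) else st
  else if pvGoPunct.contains c then
    let st' := if !st.2.isEmpty then (st.1 ++ [String.mk st.2], ([] : List Char)) else st
    (st'.1 ++ [String.mk [c]], st'.2)
  else if pvGoOps.contains c then
    let st' := if !st.2.isEmpty then (st.1 ++ [String.mk st.2], ([] : List Char)) else st
    (st'.1, st'.2 ++ [c])
  else
    (st.1, st.2 ++ [c])

def tokenize_simple_py (text : String) : List String :=
  let st := text.toList.foldl pvTokStep ([], [])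
  if !st.2.isEmpty then st.1 ++ [String.mk st.2] else st.1

-- ===== PORT B =====
-- "word" char: neither whitespace nor punctuation nor operator
def pvIsWord (c : Char) : Bool :=
  !(PySem.Chars.isspace c || pvGoPunct.contains c || pvGoOps.contains c)

-- B's while loop over the scan position, as recursion on the remaining characters;
-- the inner `while j < n` run of word chars is the takeWhile/dropWhile split
def pvAltLoop : List Char → List String
  | [] => []
  | c :: rest =>
    if PySem.Chars.isspace c then pvAltLoop rest
    else if pvGoPunct.contains c then String.mk [c] :: pvAltLoop rest
    else
      String.mk (c :: rest.takeWhile pvIsWord) :: pvAltLoop (rest.dropWhile pvIsWord)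
termination_by l => l.length
decreasing_by
  · simp
  · simp
  · exact Nat.lt_succ_of_le (List.length_dropWhile_le _ _)

def tokenize_simple_py_alt (text : String) : List String := pvAltLoop text.toList

-- ===== PRECONDITION & SPEC =====
def Spec_tokenize_simple_py (text : String) (out : List String) : Prop := out = tokenize_simple_py_alt text
instance (text : String) (out : List String) : Decidable (Spec_tokenize_simple_py text out) := by unfold Spec_tokenize_simple_py; infer_instance

-- ===== CLAIM (what is proved, stated in full; the proofs are below) =====
def Claim_equal_tokenize_simple_py : Prop := ∀ (text : String), Dom_tokenize_simple_py text → Spec_tokenize_simple_py text (tokenize_simple_py text)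

-- ===== LEMMAS AND PROOFS =====

-- A's final flush, as a function of the loop state
def pvFinish (st : List String × List Char) : List String :=
  if !st.2.isEmpty then st.1 ++ [String.mk st.2] else st.1

lemma pvMain (l : List Char) : ∀ (toks : List String) (cur : List Char),
    pvFinish (List.foldl pvTokStep (toks, cur) l) =
      toks ++ (if cur.isEmpty then pvAltLoop l
               else String.mk (cur ++ l.takeWhile pvIsWord) :: pvAltLoop (l.dropWhile pvIsWord)) := by
  induction l with
  | nil =>
    intro toks cur
    by_cases hc : cur = [] <;> simp [pvFinish, pvAltLoop, hc]
  | cons c l ih =>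
    intro toks cur
    by_cases hs : PySem.Chars.isspace c = true
    · have hw : pvIsWord c = false := by simp [pvIsWord, hs]
      by_cases hc : cur = [] <;>
        simp [List.foldl_cons, pvTokStep, hs, hc, ih, pvAltLoop, hw, List.takeWhile_cons,
          List.dropWhile_cons]
    · have hs' : PySem.Chars.isspace c = false := by simpa using hs
      by_cases hp : c ∈ pvGoPunct
      · have hw : pvIsWord c = false := by
          simp [pvIsWord, hs']
          intro h
          exact absurd hp h
        by_cases hc : cur = [] <;>
          simp [List.foldl_cons, pvTokStep, hs, hp, hc, ih, pvAltLoop, hw, List.takeWhile_cons,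
            List.dropWhile_cons]
      · by_cases ho : c ∈ pvGoOps
        · have hw : pvIsWord c = false := by
            simp [pvIsWord, hs']
            intro _
            exact ho
          by_cases hc : cur = [] <;>
            simp [List.foldl_cons, pvTokStep, hs, hp, ho, hc, ih, pvAltLoop, hw,
              List.takeWhile_cons, List.dropWhile_cons]
        · have hw : pvIsWord c = true := by simp [pvIsWord, hs', hp, ho]
          by_cases hc : cur = [] <;>
            simp [List.foldl_cons, pvTokStep, hs, hp, ho, hc, ih, pvAltLoop, hw,
              List.takeWhile_cons, List.dropWhile_cons]

-- ===== VERDICT (by name: the statement is the Claim_ definition above) =====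
theorem tokenize_simple_py_spec : Claim_equal_tokenize_simple_py := by
  intro text _
  unfold Spec_tokenize_simple_py tokenize_simple_py tokenize_simple_py_alt
  have h := pvMain text.toList [] []
  simpa [pvFinish] using h
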